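-- pv_equiv track=rewrite | github.com/asikulsk01/Python-Programs | weirdNumber.py | checkSemiPerfect
-- ===== SOURCE A (Python) =====
-- from math import sqrt
--
-- def factors(n):
--     # vector to store the factors
--     v = []
--     v.append(1)
--
--     # note that this loop runs till sqrt(n)
--     for i in range(2, int(sqrt(n)) + 1, 1):
--
--         # if the value of i is a factor
--         if (n % i == 0):
--             v.append(i);
--
--             # condition to check the divisor is not the number itself
--             if (int(n / i) != i):
--                 v.append(int(n / i))
--
--     # return the vector
--     return v
--
-- def checkSemiPerfect(n):
--     # find the divisors
--     v = factors(n)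
--
--     # sorting the vector
--     v.sort(reverse=False)
--     r = len(v)
--
--     # subset to check if no is semiperfect
--     subset = [[0 for i in range(n + 1)]
--               for j in range(r + 1)]
--
--     # initialising 1st column to true
--     for i in range(r + 1):
--         subset[i][0] = True
--
--     # initialing 1st row except zero position to 0
--     for i in range(1, n + 1):
--         subset[0][i] = False
--
--     # loop to find whether the number is semiperfect
--     for i in range(1, r + 1):
--         for j in range(1, n + 1):
--
--             # calculation to check if the number can be made by summation of divisors
--             if (j < v[i - 1]):
--                 subset[i][j] = subset[i - 1][j]
--             else:
--                 subset[i][j] = (subset[i - 1][j] or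
--                                 subset[i - 1][j - v[i - 1]])
--
--     # if not possible to make the number by any combination of divisors
--     if ((subset[r][n]) == 0):
--         return False
--     else:
--         return True
-- ===== SOURCE B (Python) =====
-- from math import isqrt
--
-- def checkSemiPerfect(n):
--     # Pruned depth-first search with an explicit stack over the divisors sorted
--     # descending; each stack entry carries (remaining divisors, their sum, target).
--     # A deficient remainder (sum < target) is cut off immediately; no DP table.
--     divs = []
--     for i in range(2, isqrt(n) + 1):
--         if n % i == 0:
--             divs.append(i)
--             if n // i != i:
--                 divs.append(n // i)
--     divs.append(1)
--     divs.sort(reverse=True)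
--     stack = [(divs, sum(divs), n)]
--     while stack:
--         ds, s, t = stack.pop()
--         if t == 0:
--             return True
--         if s < t:
--             continue
--         d = ds[0]
--         rest = ds[1:]
--         stack.append((rest, s - d, t))
--         if d <= t:
--             stack.append((rest, s - d, t - d))
--     return False
-- ===== Notes on version B (the rewrite author's own statement) =====
-- stated objective: faster
-- what changed: Replaces the bottom-up (r+1)x(n+1) boolean DP table with a top-down depth-first search over the divisors sorted descending, run with an explicit stack and a suffix-sum prune (a remainder whose remaining divisors sum below the target is cut off), so no table proportional to n is ever built.
import Mathlib
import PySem

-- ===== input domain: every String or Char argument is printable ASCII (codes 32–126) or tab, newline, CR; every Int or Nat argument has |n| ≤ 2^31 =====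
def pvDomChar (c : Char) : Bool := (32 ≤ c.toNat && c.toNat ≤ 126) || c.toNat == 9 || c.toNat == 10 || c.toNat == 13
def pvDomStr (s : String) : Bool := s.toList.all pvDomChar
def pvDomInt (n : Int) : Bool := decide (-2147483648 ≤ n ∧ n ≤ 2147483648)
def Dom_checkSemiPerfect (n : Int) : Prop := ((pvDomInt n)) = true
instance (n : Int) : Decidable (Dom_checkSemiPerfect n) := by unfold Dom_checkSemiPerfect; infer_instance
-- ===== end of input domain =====

-- B replaces A's (r+1)x(n+1) bottom-up DP table (+ sort) by an explicit-stack
-- depth-first search over the divisors sorted descending with a suffix-sum prune: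
-- same answer, no table proportional to n.


-- ===== PORT A =====
-- int(sqrt(n)) is ported as Nat.sqrt n.toNat and int(n / i) (i a divisor of n) as floordiv:
-- both are exact for 0 ≤ n ≤ 2^31 (the double results are exact there).
def pvFactorsA (n : Int) : List Int :=
  let v : List Int := [1]
  (PySem.List.pyRange 2 ((Nat.sqrt n.toNat : Int) + 1) 1).foldl
    (fun v i =>
      if PySem.Int.mod n i = 0 then
        let v := v ++ [i]
        if PySem.Int.floordiv n i ≠ i then v ++ [PySem.Int.floordiv n i] else v
      else v) v

def checkSemiPerfect (n : Int) : Bool :=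
  let v := PySem.List.sorted (pvFactorsA n) (fun x => x) false
  let r := v.length
  -- subset = [[0]*(n+1)]*(r+1); the 0s are only ever read as booleans, so the cells are Bool;
  -- the rows are Arrays (like Python lists) and subset[i][j] = x is Array.modify
  let subset : Array (Array Bool) := Array.replicate (r + 1) (Array.replicate (n.toNat + 1) false)
  let subset := (List.range (r + 1)).foldl
      (fun t i => t.modify i (fun row => row.setIfInBounds 0 true)) subset
  let subset := (PySem.List.pyRange 1 (n + 1) 1).foldl
      (fun t i => t.modify 0 (fun row => row.setIfInBounds i.toNat false)) subset
  let subset := (List.range' 1 r).foldl (fun t i =>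
      (PySem.List.pyRange 1 (n + 1) 1).foldl (fun t j =>
        let vi := v.getD (i - 1) 0
        let val := if j < vi then (t.getD (i - 1) #[]).getD j.toNat false
                   else ((t.getD (i - 1) #[]).getD j.toNat false
                         || (t.getD (i - 1) #[]).getD (j - vi).toNat false)
        t.modify i (fun row => row.setIfInBounds j.toNat val)) t) subset
  if ((subset.getD r #[]).getD n.toNat false) = false then false else true

-- ===== PORT B =====
-- the while-stack loop of Source B; a stack entry is (remaining divisors, their sum, target).
-- The '[] => pvLoop st' branch is a totality guard only: Python never reaches ds[0] with
-- ds empty, because an empty remainder has an empty sum and is pruned first.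
def pvLoop : List (List Int × Int × Int) → Bool
  | [] => false
  | (ds, s, t) :: st =>
    if t = 0 then true
    else if s < t then pvLoop st
    else match ds with
      | [] => pvLoop st
      | d :: rest =>
        if d ≤ t then pvLoop ((rest, s - d, t - d) :: (rest, s - d, t) :: st)
        else pvLoop ((rest, s - d, t) :: st)
termination_by st => (st.map (fun e => 3 ^ e.1.length)).sum
decreasing_by
  all_goals simp only [List.map_cons, List.sum_cons, List.length_cons, pow_succ]
  all_goals (have h2 : ∀ k : Nat, 0 < 3 ^ k := fun k => Nat.pow_pos (by omega))
  · exact Nat.lt_add_of_pos_left (h2 _)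
  · exact Nat.lt_add_of_pos_left (h2 _)
  · have := h2 rest.length; omega
  · have := h2 rest.length; omega

-- isqrt(n) → Nat.sqrt, n // i → floordiv
def checkSemiPerfect_alt (n : Int) : Bool :=
  let divs : List Int := (PySem.List.pyRange 2 ((Nat.sqrt n.toNat : Int) + 1) 1).foldl
    (fun v i =>
      if PySem.Int.mod n i = 0 then
        let v := v ++ [i]
        if PySem.Int.floordiv n i ≠ i then v ++ [PySem.Int.floordiv n i] else v
      else v) []
  let divs := divs ++ [1]
  let divs := PySem.List.sorted divs (fun x => x) true
  pvLoop [(divs, divs.sum, n)]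

-- ===== PRECONDITION & SPEC =====
-- Pre_: A calls math.sqrt(n), which raises ValueError for n < 0 (B's isqrt raises there too).
def Pre_checkSemiPerfect (n : Int) : Prop := 0 ≤ n
instance (n : Int) : Decidable (Pre_checkSemiPerfect n) := by unfold Pre_checkSemiPerfect; infer_instance
def pvWitness_checkSemiPerfect : Int := 6

def Spec_checkSemiPerfect (n : Int) (out : Bool) : Prop := out = checkSemiPerfect_alt n
instance (n : Int) (out : Bool) : Decidable (Spec_checkSemiPerfect n out) := by unfold Spec_checkSemiPerfect; infer_instance

-- ===== CLAIM (what is proved, stated in full; the proofs are below) =====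
def Claim_equal_checkSemiPerfect : Prop := ∀ (n : Int), Dom_checkSemiPerfect n → Pre_checkSemiPerfect n → Spec_checkSemiPerfect n (checkSemiPerfect n)

-- ===== LEMMAS AND PROOFS =====

-- one bitset step, and the bitset reached from a list of addends (proof-side model:
-- bit j of pvReach l = "some sublist of l sums to j")
def pvStep (m : Nat) (d : Int) : Nat := m ||| (m <<< d.toNat)
def pvReach (l : List Int) : Nat := l.foldl pvStep 1
-- the elements A's loop body appends for a given i
def pvAdd (n i : Int) : List Int :=
  if PySem.Int.mod n i = 0 then
    (if PySem.Int.floordiv n i ≠ i then [i, PySem.Int.floordiv n i] else [i])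
  else []
-- row j ↦ bit j of a mask, columns 0..N
def pvRow (m : Nat) (N : Nat) : List Bool := (List.range (N + 1)).map m.testBit
-- the table after the first i outer iterations (w = sorted divisor list, r = w.length)
def pvTable (w : List Int) (N r i : Nat) : List (List Bool) :=
  (List.range (i + 1)).map (fun k => pvRow (pvReach (w.take k)) N)
    ++ List.replicate (r - i) (pvRow 1 N)

-- the same table computation with List-of-List state (proof-side mirror of port A)
def pvCheckL (n : Int) : Bool :=
  let v := PySem.List.sorted (pvFactorsA n) (fun x => x) false
  let r := v.length
  let subset : List (List Bool) := List.replicate (r + 1) (List.replicate (n.toNat + 1) false)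
  let subset := (List.range (r + 1)).foldl
      (fun t i => t.set i ((t.getD i []).set 0 true)) subset
  let subset := (PySem.List.pyRange 1 (n + 1) 1).foldl
      (fun t i => t.set 0 ((t.getD 0 []).set i.toNat false)) subset
  let subset := (List.range' 1 r).foldl (fun t i =>
      (PySem.List.pyRange 1 (n + 1) 1).foldl (fun t j =>
        let vi := v.getD (i - 1) 0
        let val := if j < vi then (t.getD (i - 1) []).getD j.toNat false
                   else ((t.getD (i - 1) []).getD j.toNat false
                         || (t.getD (i - 1) []).getD (j - vi).toNat false)
        t.set i ((t.getD i []).set j.toNat val)) t) subset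
  if ((subset.getD r []).getD n.toNat false) = false then false else true

theorem pvStep_testBit (m : Nat) (d : Int) (k : Nat) :
    (pvStep m d).testBit k = (m.testBit k || (decide (d.toNat ≤ k) && m.testBit (k - d.toNat))) := by
  simp [pvStep, Nat.testBit_or, Nat.testBit_shiftLeft]

theorem pvStep_comm (m : Nat) (d e : Int) : pvStep (pvStep m d) e = pvStep (pvStep m e) d := by
  apply Nat.eq_of_testBit_eq; intro k
  simp only [pvStep_testBit]
  by_cases h1 : d.toNat ≤ k <;> by_cases h2 : e.toNat ≤ k <;>
    by_cases h3 : e.toNat ≤ k - d.toNat <;> by_cases h4 : d.toNat ≤ k - e.toNat <;>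
    first
      | (exfalso; omega)
      | (simp [h1, h2, h3, h4, Nat.sub_sub, Nat.add_comm, Bool.or_assoc, Bool.or_comm,
          Bool.or_left_comm])

theorem pvReach_perm {l l' : List Int} (h : l.Perm l') : pvReach l = pvReach l' := by
  haveI : RightCommutative pvStep := ⟨fun b a a' => pvStep_comm b a a'⟩
  exact h.foldl_eq 1

theorem pvReach_testBit_zero (l : List Int) : (pvReach l).testBit 0 = true := by
  suffices h : ∀ (m : Nat), m.testBit 0 = true → (l.foldl pvStep m).testBit 0 = true from
    h 1 (by decide)
  induction l with
  | nil => intro m hm; simpa using hm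
  | cons a t ih => intro m hm; exact ih _ (by rw [pvStep_testBit]; simp [hm])

theorem pvFactorsA_eq (n : Int) :
    pvFactorsA n = 1 :: (PySem.List.pyRange 2 ((Nat.sqrt n.toNat : Int) + 1) 1).flatMap (pvAdd n) := by
  have hb : (fun (v : List Int) (i : Int) =>
      if PySem.Int.mod n i = 0 then
        let v' := v ++ [i]
        if PySem.Int.floordiv n i ≠ i then v' ++ [PySem.Int.floordiv n i] else v'
      else v) = fun v i => v ++ pvAdd n i := by
    funext v i; simp only [pvAdd]; split_ifs <;> simp
  show (PySem.List.pyRange 2 ((Nat.sqrt n.toNat : Int) + 1) 1).foldl _ [1] = _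
  rw [hb, PySem.List.foldl_append_eq_flatMap]
  simp

theorem pvFactorsA_nonneg (n : Int) (hn : 0 ≤ n) : ∀ x ∈ pvFactorsA n, 0 ≤ x := by
  intro x hx
  rw [pvFactorsA_eq] at hx
  rcases List.mem_cons.mp hx with rfl | hx
  · omega
  · simp only [List.mem_flatMap] at hx
    obtain ⟨i, hi, hxi⟩ := hx
    rw [PySem.List.mem_pyRange_one] at hi
    have hipos : (0:Int) < i := by omega
    have hdiv : 0 ≤ PySem.Int.floordiv n i := by
      rw [PySem.Int.floordiv_eq_ediv_of_pos hipos]; exact Int.ediv_nonneg hn (le_of_lt hipos)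
    simp only [pvAdd] at hxi
    split_ifs at hxi <;> simp only [List.mem_cons, List.not_mem_nil] at hxi
    · rcases hxi with rfl | rfl | h
      · omega
      · exact hdiv
      · exact absurd h (by simp)
    · rcases hxi with rfl | h
      · omega
      · exact absurd h (by simp)

-- ===== B-side: subset-sum spec and the DFS loop invariant =====

-- "some sublist of ds sums to t"
def pvSS : List Int → Int → Bool
  | [], t => t == 0
  | d :: ds, t => pvSS ds t || pvSS ds (t - d)

theorem pvSS_zero (ds : List Int) : pvSS ds 0 = true := by
  induction ds with
  | nil => rfl
  | cons d ds ih => simp [pvSS, ih]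

theorem pvSS_neg (ds : List Int) (hds : ∀ x ∈ ds, 0 ≤ x) (t : Int) (ht : t < 0) :
    pvSS ds t = false := by
  induction ds generalizing t with
  | nil => simp [pvSS]; omega
  | cons d ds ih =>
    have hd : 0 ≤ d := hds d (by simp)
    rw [pvSS, ih (fun x hx => hds x (by simp [hx])) t ht,
      ih (fun x hx => hds x (by simp [hx])) (t - d) (by omega)]
    rfl

theorem pvSS_gt (ds : List Int) (hds : ∀ x ∈ ds, 0 ≤ x) (t : Int) (ht : ds.sum < t) :
    pvSS ds t = false := by
  induction ds generalizing t with
  | nil => simp [pvSS]; simp at ht; omega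
  | cons d ds ih =>
    have hd : 0 ≤ d := hds d (by simp)
    simp only [List.sum_cons] at ht
    rw [pvSS, ih (fun x hx => hds x (by simp [hx])) t (by omega),
      ih (fun x hx => hds x (by simp [hx])) (t - d) (by omega)]
    rfl

-- the DFS loop computes "some stack entry has a sub-sum reaching its target"
theorem pvLoop_eq (st : List (List Int × Int × Int))
    (hst : ∀ e ∈ st, (∀ x ∈ e.1, 0 ≤ x) ∧ e.2.1 = e.1.sum) :
    pvLoop st = st.any (fun e => pvSS e.1 e.2.2) := by
  induction st using pvLoop.induct with
  | case1 => rw [pvLoop.eq_def]; rfl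
  | case2 ds s st =>
    rw [pvLoop.eq_def]
    simp [pvSS_zero]
  | case3 ds s t st ht hs ih =>
    obtain ⟨hpos, hsum⟩ := hst (ds, s, t) (by simp)
    rw [pvLoop.eq_def]
    simp only [ht, if_false, hs]
    rw [ih (fun e he => hst e (by simp [he])), List.any_cons]
    rw [pvSS_gt ds hpos t (by rw [← hsum]; exact hs)]
    simp
  | case4 s t st ht hs ih =>
    rw [pvLoop.eq_def]
    simp only [ht, if_false, hs]
    rw [ih (fun e he => hst e (by simp [he])), List.any_cons]
    simp [pvSS, ht]
  | case5 s t st ht hs d rest hd ih =>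
    obtain ⟨hpos, hsum⟩ := hst (d :: rest, s, t) (by simp)
    have hrest : ∀ x ∈ rest, (0:Int) ≤ x := fun x hx => hpos x (by simp [hx])
    have hsum' : s - d = rest.sum := by simp only [List.sum_cons] at hsum; omega
    rw [pvLoop.eq_def]
    simp only [ht, if_false, hs, if_true, hd, if_true]
    rw [ih ?_, List.any_cons, List.any_cons, List.any_cons]
    · simp only [pvSS]
      cases pvSS rest t <;> cases pvSS rest (t - d) <;>
        cases st.any (fun e => pvSS e.1 e.2.2) <;> rfl
    · intro e he
      rcases List.mem_cons.mp he with rfl | he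
      · exact ⟨hrest, hsum'⟩
      · rcases List.mem_cons.mp he with rfl | he
        · exact ⟨hrest, hsum'⟩
        · exact hst e (by simp [he])
  | case6 s t st ht hs d rest hd ih =>
    obtain ⟨hpos, hsum⟩ := hst (d :: rest, s, t) (by simp)
    have hrest : ∀ x ∈ rest, (0:Int) ≤ x := fun x hx => hpos x (by simp [hx])
    have hsum' : s - d = rest.sum := by simp only [List.sum_cons] at hsum; omega
    rw [pvLoop.eq_def]
    simp only [ht, if_false, hs, hd, if_false]
    rw [ih ?_, List.any_cons, List.any_cons]
    · simp only [pvSS]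
      rw [pvSS_neg rest hrest (t - d) (by omega)]
      simp
    · intro e he
      rcases List.mem_cons.mp he with rfl | he
      · exact ⟨hrest, hsum'⟩
      · exact hst e (by simp [he])

-- fold out one pvStep through a foldl (pvStep is right-commutative)
theorem pvFold_step_out (ds : List Int) (m : Nat) (d : Int) :
    ds.foldl pvStep (pvStep m d) = pvStep (ds.foldl pvStep m) d := by
  induction ds generalizing m with
  | nil => rfl
  | cons e ds ih => rw [List.foldl_cons, List.foldl_cons, pvStep_comm, ih]

theorem pvReach_cons (d : Int) (ds : List Int) :
    pvReach (d :: ds) = pvStep (pvReach ds) d := by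
  rw [pvReach, List.foldl_cons, pvFold_step_out]; rfl

-- bit k of the reachable-sum bitset = the subset-sum predicate at k
theorem pvReach_testBit_SS (ds : List Int) (hds : ∀ x ∈ ds, 0 ≤ x) (k : Nat) :
    (pvReach ds).testBit k = pvSS ds (k : Int) := by
  induction ds generalizing k with
  | nil =>
    simp only [pvReach, List.foldl_nil, pvSS]
    rcases k with _ | k
    · rfl
    · have h1 : Nat.testBit 1 (k+1) = false := by rw [Nat.testBit_succ]; simp
      rw [h1]
      symm
      simp only [beq_eq_false_iff_ne, ne_eq]
      omega
  | cons d ds ih =>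
    have hd : 0 ≤ d := hds d (by simp)
    have hrest : ∀ x ∈ ds, (0:Int) ≤ x := fun x hx => hds x (by simp [hx])
    rw [pvReach_cons, pvStep_testBit, pvSS, ih hrest]
    by_cases hc : d ≤ (k : Int)
    · have h1 : d.toNat ≤ k := by omega
      have h2 : ((k - d.toNat : Nat) : Int) = (k : Int) - d := by omega
      rw [ih hrest, h2]
      simp [h1]
    · have h1 : ¬ (d.toNat ≤ k) := by omega
      rw [pvSS_neg ds hrest ((k : Int) - d) (by omega)]
      simp [h1]

-- B's port computes bit n of the bitset reached from A's (unsorted) divisor list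
theorem pvAlt_eq (n : Int) (hn : 0 ≤ n) :
    checkSemiPerfect_alt n = (pvReach (pvFactorsA n)).testBit n.toNat := by
  simp only [checkSemiPerfect_alt]
  set divs0 : List Int := (PySem.List.pyRange 2 ((Nat.sqrt n.toNat : Int) + 1) 1).foldl
    (fun v i =>
      if PySem.Int.mod n i = 0 then
        let v := v ++ [i]
        if PySem.Int.floordiv n i ≠ i then v ++ [PySem.Int.floordiv n i] else v
      else v) [] with hdivs0
  have h0 : divs0 = (PySem.List.pyRange 2 ((Nat.sqrt n.toNat : Int) + 1) 1).flatMap (pvAdd n) := by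
    have hb : (fun (v : List Int) (i : Int) =>
        if PySem.Int.mod n i = 0 then
          let v' := v ++ [i]
          if PySem.Int.floordiv n i ≠ i then v' ++ [PySem.Int.floordiv n i] else v'
        else v) = fun v i => v ++ pvAdd n i := by
      funext v i; simp only [pvAdd]; split_ifs <;> simp
    rw [hdivs0, hb, PySem.List.foldl_append_eq_flatMap]
    simp
  have hperm : (PySem.List.sorted (divs0 ++ [1]) (fun x => x) true).Perm (pvFactorsA n) := by
    refine (PySem.List.sorted_perm _ _ _).trans ?_
    rw [h0, pvFactorsA_eq]
    exact (List.perm_append_singleton _ _).trans (List.Perm.refl _)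
  set w := PySem.List.sorted (divs0 ++ [1]) (fun x => x) true with hw
  have hwpos : ∀ x ∈ w, (0:Int) ≤ x := fun x hx =>
    pvFactorsA_nonneg n hn x (hperm.mem_iff.mp hx)
  rw [pvLoop_eq [(w, w.sum, n)] (by intro e he; simp at he; subst he; exact ⟨hwpos, rfl⟩)]
  simp only [List.any_cons, List.any_nil, Bool.or_false]
  rw [← pvReach_perm hperm, pvReach_testBit_SS w hwpos n.toNat,
    show ((n.toNat : Nat) : Int) = n by omega]

-- ===== A-side: the DP table computes the same bitset, row by row =====

-- generic lemmas about folds that write list positions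
theorem aux_getD {α} (pre : List α) (x : α) (a : List α) (d : α) :
    (pre ++ x :: a).getD pre.length d = x := by
  rw [List.getD_eq_getElem?_getD, List.getElem?_append_right (le_refl _)]; simp

theorem aux_set {α} (pre : List α) (x y : α) (a : List α) :
    (pre ++ x :: a).set pre.length y = pre ++ y :: a := by
  induction pre with
  | nil => simp
  | cons p pre ih => simp [ih]

theorem pvGetD_set_ne {α} (t : List α) (i j : Nat) (h : i ≠ j) (x d : α) :
    (t.set i x).getD j d = t.getD j d := by
  simp [List.getD_eq_getElem?_getD, List.getElem?_set_ne h]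

theorem pvGetD_set_self {α} (t : List α) (i : Nat) (h : i < t.length) (x d : α) :
    (t.set i x).getD i d = x := by
  simp [List.getD_eq_getElem?_getD, List.getElem?_set_self h]

theorem pvFold_set_map (g : List Bool → List Bool) :
    ∀ (a pre : List (List Bool)),
      (List.range' pre.length a.length).foldl
        (fun t i => t.set i (g (t.getD i []))) (pre ++ a) = pre ++ a.map g := by
  intro a
  induction a with
  | nil => intro pre; simp
  | cons x a ih =>
    intro pre
    rw [List.length_cons, List.range'_succ, List.foldl_cons,
      aux_getD pre x a [], aux_set pre x (g x) a]
    have := ih (pre ++ [g x])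
    simpa using this

theorem pvFold_fill {α} (g : Nat → α) :
    ∀ (a pre : List α),
      (List.range' pre.length a.length).foldl
        (fun row k => row.set k (g k)) (pre ++ a)
      = pre ++ (List.range' pre.length a.length).map g := by
  intro a
  induction a with
  | nil => intro pre; simp
  | cons x a ih =>
    intro pre
    rw [List.length_cons, List.range'_succ, List.foldl_cons, aux_set pre x (g pre.length) a,
      List.map_cons]
    have := ih (pre ++ [g pre.length])
    simpa using this

theorem pvFold_extract (i p : Nat) (hne : p ≠ i) (f : List Bool → List Bool → Int → List Bool) :
    ∀ (js : List Int) (t : List (List Bool)), i < t.length →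
      js.foldl (fun t j => t.set i (f (t.getD p []) (t.getD i []) j)) t
        = t.set i (js.foldl (fun row j => f (t.getD p []) row j) (t.getD i [])) := by
  intro js
  induction js with
  | nil =>
    intro t ht
    simp only [List.foldl_nil]
    rw [List.getD_eq_getElem?_getD, List.getElem?_eq_getElem ht]
    exact (List.set_getElem_self ht).symm
  | cons j js ih =>
    intro t ht
    rw [List.foldl_cons, List.foldl_cons,
      ih (t.set i (f (t.getD p []) (t.getD i []) j)) (by simpa using ht)]
    rw [pvGetD_set_ne t i p (fun h => hne h.symm), pvGetD_set_self t i ht, List.set_set]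

theorem aux_set_len {α} (pre : List α) (x y : α) (a : List α) (i : Nat) (h : pre.length = i) :
    (pre ++ x :: a).set i y = pre ++ y :: a := by
  subst h; exact aux_set pre x y a

theorem pvRow_one (N : Nat) : pvRow 1 N = true :: List.replicate N false := by
  rw [pvRow, List.range_succ_eq_map, List.map_cons, List.map_map]
  have h2 : List.map (Nat.testBit 1 ∘ Nat.succ) (List.range N) = List.replicate N false := by
    have h : (Nat.testBit 1 ∘ Nat.succ) = fun _ => false := by
      funext k; simp [Nat.testBit_succ]
    rw [h, List.map_const', List.length_range]
  rw [h2]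
  rfl

theorem pvRow_getD (m N k : Nat) (h : k ≤ N) : (pvRow m N).getD k false = m.testBit k := by
  exact PySem.List.getD_map_range _ _ _ _ (by omega)

-- the inner j-loop turns the bit row of m into the bit row of (pvStep m d)
theorem pvRowStep (n : Int) (hn : 0 ≤ n) (m : Nat) (d : Int) (hd : 0 ≤ d)
    (hm : m.testBit 0 = true) :
    (PySem.List.pyRange 1 (n + 1) 1).foldl
      (fun row j => row.set j.toNat
        (if j < d then (pvRow m n.toNat).getD j.toNat false
         else ((pvRow m n.toNat).getD j.toNat false
               || (pvRow m n.toNat).getD (j - d).toNat false))) (pvRow 1 n.toNat)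
      = pvRow (pvStep m d) n.toNat := by
  set N := n.toNat with hN
  set g : Nat → Bool := fun k =>
    (if (k : Int) < d then (pvRow m N).getD k false
     else ((pvRow m N).getD k false || (pvRow m N).getD ((k : Int) - d).toNat false)) with hg
  have hrange : (n + 1 - 1).toNat = N := by omega
  rw [PySem.List.pyRange_one, hrange, List.foldl_map]
  have hbody : (fun (row : List Bool) (k : Nat) => row.set ((1 : Int) + (k : Int)).toNat
      (if (1 : Int) + (k : Int) < d then (pvRow m N).getD ((1 : Int) + (k : Int)).toNat false
       else ((pvRow m N).getD ((1 : Int) + (k : Int)).toNat false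
             || (pvRow m N).getD (((1 : Int) + (k : Int)) - d).toNat false)))
      = fun row k => row.set (1 + k) (g (1 + k)) := by
    funext row k
    have h1 : ((1 : Int) + (k : Int)).toNat = 1 + k := by omega
    have h2 : ((1 + k : Nat) : Int) = (1 : Int) + (k : Int) := by push_cast; ring
    rw [hg]; simp only [h1, h2]
  rw [hbody, ← List.foldl_map (f := fun x : Nat => 1 + x)
      (g := fun (row : List Bool) (k : Nat) => row.set k (g k)),
    ← List.range'_eq_map_range]
  have hfill := pvFold_fill g (List.replicate N false) [true]
  simp only [List.length_cons, List.length_nil, List.length_replicate,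
    List.singleton_append] at hfill
  rw [pvRow_one, hfill]
  -- now show the filled row is the bit row of (pvStep m d)
  rw [pvRow, List.range_succ_eq_map, List.map_cons]
  have hhead : (pvStep m d).testBit 0 = true := by
    rw [pvStep_testBit]; simp [hm]
  rw [hhead]
  congr 1
  rw [List.range'_eq_map_range, List.map_map, List.map_map]
  apply List.map_congr_left
  intro k hk
  have hkN : k < N := List.mem_range.mp hk
  simp only [Function.comp, Nat.zero_add]
  have hgd1 : (pvRow m N).getD (1 + k) false = m.testBit (1 + k) := pvRow_getD m N (1 + k) (by omega)
  rw [show ∀ x, g x = (if (x : Int) < d then (pvRow m N).getD x false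
      else ((pvRow m N).getD x false || (pvRow m N).getD ((x : Int) - d).toNat false))
    from fun _ => rfl]
  by_cases hc : ((1 + k : Nat) : Int) < d
  · rw [if_pos hc, pvStep_testBit, hgd1]
    have : ¬ (d.toNat ≤ k + 1) := by omega
    simp [this, Nat.add_comm 1 k]
  · rw [if_neg hc, pvStep_testBit, hgd1]
    have h3 : (((1 + k : Nat) : Int) - d).toNat = 1 + k - d.toNat := by omega
    have h4 : (pvRow m N).getD (1 + k - d.toNat) false = m.testBit (1 + k - d.toNat) :=
      pvRow_getD m N _ (by omega)
    have h5 : d.toNat ≤ k + 1 := by omega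
    rw [h3, h4]
    simp [h5, Nat.add_comm 1 k]

theorem pvTable_zero (w : List Int) (N r : Nat) :
    pvTable w N r 0 = List.replicate (r + 1) (pvRow 1 N) := by
  simp [pvTable, pvReach, List.replicate_succ]

theorem pvTable_length (w : List Int) (N r i : Nat) (h : i ≤ r) :
    (pvTable w N r i).length = r + 1 := by
  simp [pvTable]; omega

theorem pvTable_getD (w : List Int) (N r i k : Nat) (hk : k ≤ i) (_hi : i ≤ r) :
    (pvTable w N r i).getD k [] = pvRow (pvReach (w.take k)) N := by
  rw [pvTable, List.getD_eq_getElem?_getD,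
    List.getElem?_append_left (by simp; omega), List.getElem?_map,
    List.getElem?_range (by omega)]
  rfl

theorem pvTable_getD_fresh (w : List Int) (N r i k : Nat) (hk : i < k) (hi : k ≤ r) :
    (pvTable w N r i).getD k [] = pvRow 1 N := by
  rw [pvTable, List.getD_eq_getElem?_getD,
    List.getElem?_append_right (by simp; omega)]
  have hlt : k - ((List.range (i+1)).map
      (fun k => pvRow (pvReach (w.take k)) N)).length < r - i := by simp; omega
  simp only [List.getElem?_replicate, List.length_map, List.length_range]
  rw [if_pos (by omega)]
  rfl

theorem pvTable_set (w : List Int) (N r i : Nat) (h1 : 1 ≤ i) (h2 : i ≤ r) :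
    (pvTable w N r (i - 1)).set i (pvRow (pvReach (w.take i)) N) = pvTable w N r i := by
  have e1 : i - 1 + 1 = i := by omega
  have e2 : r - (i - 1) = (r - i) + 1 := by omega
  rw [pvTable, pvTable, e1, e2, List.replicate_succ,
    aux_set_len _ _ _ _ i (by simp),
    show i + 1 = i + 1 from rfl, List.range_succ, List.map_append, List.map_singleton,
    List.append_assoc, List.singleton_append]

-- phase 2 of A rewrites row 0 with the values it already has
theorem pvRowClear (n : Int) (hn : 0 ≤ n) :
    (PySem.List.pyRange 1 (n + 1) 1).foldl (fun row j => row.set j.toNat false)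
      (pvRow 1 n.toNat) = pvRow 1 n.toNat := by
  have hrange : (n + 1 - 1).toNat = n.toNat := by omega
  rw [PySem.List.pyRange_one, hrange, List.foldl_map]
  have hbody : (fun (row : List Bool) (k : Nat) => row.set ((1 : Int) + (k : Int)).toNat false)
      = fun row k => row.set (1 + k) ((fun _ : Nat => false) (1 + k)) := by
    funext row k
    have h1 : ((1 : Int) + (k : Int)).toNat = 1 + k := by omega
    rw [h1]
  rw [hbody, ← List.foldl_map (f := fun x : Nat => 1 + x)
      (g := fun (row : List Bool) (k : Nat) => row.set k ((fun _ : Nat => false) k)),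
    ← List.range'_eq_map_range]
  have hfill := pvFold_fill (fun _ : Nat => false) (List.replicate n.toNat false) [true]
  simp only [List.length_cons, List.length_nil, List.length_replicate,
    List.singleton_append] at hfill
  rw [pvRow_one, hfill, List.map_const', List.length_range']

-- the outer i-loop carries the table from stage (a-1) to stage (a-1)+b
theorem pvOuter (n : Int) (hn : 0 ≤ n) (w : List Int) (hw : ∀ x ∈ w, 0 ≤ x) :
    ∀ (b a : Nat), 1 ≤ a → a - 1 + b ≤ w.length →
      (List.range' a b).foldl
        (fun t i =>
          (PySem.List.pyRange 1 (n + 1) 1).foldl (fun t j =>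
            t.set i ((t.getD i []).set j.toNat
              (if j < w.getD (i - 1) 0 then (t.getD (i - 1) []).getD j.toNat false
               else ((t.getD (i - 1) []).getD j.toNat false
                     || (t.getD (i - 1) []).getD (j - w.getD (i - 1) 0).toNat false)))) t)
        (pvTable w n.toNat w.length (a - 1))
      = pvTable w n.toNat w.length (a - 1 + b) := by
  intro b
  induction b with
  | zero => intro a _ _; simp
  | succ b ih =>
    intro a ha hab
    obtain ⟨a', rfl⟩ : ∃ a', a = a' + 1 := ⟨a - 1, by omega⟩
    rw [List.range'_succ, List.foldl_cons]
    simp only [Nat.add_sub_cancel]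
    have halen : a' < w.length := by omega
    have hstep :
        (PySem.List.pyRange 1 (n + 1) 1).foldl (fun t j =>
            t.set (a' + 1) ((t.getD (a' + 1) []).set j.toNat
              (if j < w.getD a' 0 then (t.getD a' []).getD j.toNat false
               else ((t.getD a' []).getD j.toNat false
                     || (t.getD a' []).getD (j - w.getD a' 0).toNat false))))
          (pvTable w n.toNat w.length a')
        = pvTable w n.toNat w.length (a' + 1) := by
      have hlen : a' + 1 < (pvTable w n.toNat w.length a').length := by
        rw [pvTable_length _ _ _ _ (by omega)]; omega
      rw [pvFold_extract (a' + 1) a' (by omega)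
        (fun prev row j => row.set j.toNat
          (if j < w.getD a' 0 then prev.getD j.toNat false
           else (prev.getD j.toNat false
                 || prev.getD (j - w.getD a' 0).toNat false)))
        (PySem.List.pyRange 1 (n + 1) 1) _ hlen]
      rw [pvTable_getD w n.toNat w.length a' a' (le_refl _) (by omega),
        pvTable_getD_fresh w n.toNat w.length a' (a' + 1) (by omega) (by omega)]
      have hd : 0 ≤ w.getD a' 0 := by
        rw [List.getD_eq_getElem?_getD, List.getElem?_eq_getElem halen]
        exact hw _ (w.getElem_mem halen)
      rw [pvRowStep n hn (pvReach (w.take a')) (w.getD a' 0) hd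
        (pvReach_testBit_zero _)]
      have hreach : pvStep (pvReach (w.take a')) (w.getD a' 0)
          = pvReach (w.take (a' + 1)) := by
        rw [List.take_add_one, List.getElem?_eq_getElem halen, pvReach, pvReach,
          List.foldl_append, List.getD_eq_getElem?_getD, List.getElem?_eq_getElem halen]
        rfl
      have hset := pvTable_set w n.toNat w.length (a' + 1) (by omega) (by omega)
      simp only [Nat.add_sub_cancel] at hset
      rw [hreach, hset]
    rw [hstep]
    have := ih (a' + 2) (by omega) (by omega)
    simp only [show ∀ x : Nat, x + 2 - 1 = x + 1 from fun x => rfl] at this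
    rw [this]
    congr 1
    omega

-- A's port computes bit n of the bitset reached from the sorted divisor list
theorem pvAList_eq (n : Int) (hn : 0 ≤ n) :
    pvCheckL n
      = (pvReach (PySem.List.sorted (pvFactorsA n) (fun x => x) false)).testBit n.toNat := by
  simp only [pvCheckL]
  set w := PySem.List.sorted (pvFactorsA n) (fun x => x) false with hw
  have hnn : ∀ x ∈ w, 0 ≤ x := by
    intro x hx
    exact pvFactorsA_nonneg n hn x ((PySem.List.mem_sorted _ _ _ _).mp hx)
  set r := w.length with hr
  -- phase 1: every row gets column 0 set to True
  have h1 : (List.range' 0 (r + 1)).foldl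
      (fun t i => t.set i ((t.getD i []).set 0 true))
      (List.replicate (r + 1) (List.replicate (n.toNat + 1) false))
      = List.replicate (r + 1) (pvRow 1 n.toNat) := by
    have := pvFold_set_map (fun row => row.set 0 true)
      (List.replicate (r + 1) (List.replicate (n.toNat + 1) false)) []
    simp only [List.nil_append, List.length_nil, List.length_replicate] at this
    rw [this, List.map_replicate, List.replicate_succ (n := n.toNat), List.set_cons_zero,
      pvRow_one]
  -- phase 2: row 0 is rewritten with the values it already holds
  have h2 : (PySem.List.pyRange 1 (n + 1) 1).foldl
      (fun t i => t.set 0 ((t.getD 0 []).set i.toNat false))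
      (List.replicate (r + 1) (pvRow 1 n.toNat))
      = List.replicate (r + 1) (pvRow 1 n.toNat) := by
    have hlen : 0 < (List.replicate (r + 1) (pvRow 1 n.toNat)).length := by simp
    rw [pvFold_extract 0 1 (by omega)
      (fun _ row j => row.set j.toNat false) (PySem.List.pyRange 1 (n + 1) 1) _ hlen]
    have hget : (List.replicate (r + 1) (pvRow 1 n.toNat)).getD 0 [] = pvRow 1 n.toNat := by
      simp [List.getD_eq_getElem?_getD]
    rw [hget, pvRowClear n hn, List.replicate_succ, List.set_cons_zero]
  rw [List.range_eq_range', h1, h2, ← pvTable_zero w n.toNat r]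
  have hout := pvOuter n hn w hnn r 1 (by omega) (by omega)
  simp only [show (1 : Nat) - 1 = 0 from rfl, Nat.zero_add] at hout
  rw [hout, pvTable_getD w n.toNat r r r (le_refl _) (le_refl _), hr, List.take_length,
    pvRow_getD _ _ _ (le_refl _)]
  cases (pvReach w).testBit n.toNat <;> simp

-- bridge: the Array table of port A projects to the List table of pvCheckL
def pvF (t : Array (Array Bool)) : List (List Bool) := t.toList.map Array.toList

theorem pvAGetD {α : Type} (a : Array α) (i : Nat) (d : α) : a.getD i d = a.toList.getD i d := by
  unfold Array.getD
  split
  · next h =>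
    rw [List.getD_eq_getElem?_getD, List.getElem?_eq_getElem (by simpa using h)]
    simp
  · next h =>
    rw [List.getD_eq_getElem?_getD, List.getElem?_eq_none (by simpa using Nat.le_of_not_lt h)]
    rfl

theorem pvReadRow (t : Array (Array Bool)) (p k : Nat) :
    ((pvF t).getD p []).getD k false = (t.getD p #[]).getD k false := by
  have h : (pvF t).getD p [] = (t.getD p #[]).toList := by
    rw [pvF, show ([] : List Bool) = (#[] : Array Bool).toList from rfl, List.getD_map,
      pvAGetD]
  rw [h, ← pvAGetD]

theorem pvBridge (t : Array (Array Bool)) (i k : Nat) (b : Bool) :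
    pvF (t.modify i (fun row => row.setIfInBounds k b))
      = (pvF t).set i (((pvF t).getD i []).set k b) := by
  unfold pvF
  rw [Array.toList_modify]
  by_cases h : i < t.toList.length
  · rw [List.modify_eq_set_get _ h, List.map_set]
    congr 1
    rw [Array.toList_setIfInBounds]
    congr 1
    rw [show ([] : List Bool) = (#[] : Array Bool).toList from rfl, List.getD_map,
      List.getD_eq_getElem?_getD, List.getElem?_eq_getElem h]
    rfl
  · rw [List.modify_eq_self (by omega),
      List.set_eq_of_length_le (by simpa using Nat.le_of_not_lt h)]

theorem pvArrList (n : Int) : checkSemiPerfect n = pvCheckL n := by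
  simp only [checkSemiPerfect, pvCheckL]
  set w := PySem.List.sorted (pvFactorsA n) (fun x => x) false with hw
  set r := w.length with hr
  set A0 : Array (Array Bool) := Array.replicate (r + 1) (Array.replicate (n.toNat + 1) false)
    with hA0
  set A1 := (List.range (r + 1)).foldl
      (fun t i => t.modify i (fun row => row.setIfInBounds 0 true)) A0 with hA1
  set A2 := (PySem.List.pyRange 1 (n + 1) 1).foldl
      (fun t i => t.modify 0 (fun row => row.setIfInBounds i.toNat false)) A1 with hA2
  set A3 := (List.range' 1 r).foldl (fun t i =>
      (PySem.List.pyRange 1 (n + 1) 1).foldl (fun t j =>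
        t.modify i (fun row => row.setIfInBounds j.toNat
          (if j < w.getD (i - 1) 0 then (t.getD (i - 1) #[]).getD j.toNat false
           else ((t.getD (i - 1) #[]).getD j.toNat false
                 || (t.getD (i - 1) #[]).getD (j - w.getD (i - 1) 0).toNat false)))) t) A2
    with hA3
  have hinit : pvF A0 = List.replicate (r + 1) (List.replicate (n.toNat + 1) false) := by
    rw [hA0, pvF, Array.toList_replicate, List.map_replicate, Array.toList_replicate]
  have h1 : (List.range (r + 1)).foldl
      (fun t i => t.set i ((t.getD i []).set 0 true))
      (List.replicate (r + 1) (List.replicate (n.toNat + 1) false)) = pvF A1 := by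
    rw [← hinit, hA1]
    exact List.foldl_hom pvF (fun x y => (pvBridge x y 0 true).symm)
  have h2 : (PySem.List.pyRange 1 (n + 1) 1).foldl
      (fun t i => t.set 0 ((t.getD 0 []).set i.toNat false)) (pvF A1) = pvF A2 := by
    rw [hA2]
    exact List.foldl_hom pvF (fun x y => (pvBridge x 0 y.toNat false).symm)
  have h3 : (List.range' 1 r).foldl (fun t i =>
      (PySem.List.pyRange 1 (n + 1) 1).foldl (fun t j =>
        t.set i ((t.getD i []).set j.toNat
          (if j < w.getD (i - 1) 0 then (t.getD (i - 1) []).getD j.toNat false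
           else ((t.getD (i - 1) []).getD j.toNat false
                 || (t.getD (i - 1) []).getD (j - w.getD (i - 1) 0).toNat false)))) t)
      (pvF A2) = pvF A3 := by
    rw [hA3]
    apply List.foldl_hom pvF
    intro x i
    apply List.foldl_hom pvF
    intro x' j
    rw [pvReadRow x' (i - 1) j.toNat, pvReadRow x' (i - 1) (j - w.getD (i - 1) 0).toNat]
    exact (pvBridge x' i j.toNat _).symm
  rw [h1, h2, h3, pvReadRow A3 r n.toNat]

-- A's port computes bit n of the bitset reached from the sorted divisor list
theorem pvA_eq (n : Int) (hn : 0 ≤ n) :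
    checkSemiPerfect n
      = (pvReach (PySem.List.sorted (pvFactorsA n) (fun x => x) false)).testBit n.toNat := by
  rw [pvArrList n, pvAList_eq n hn]

-- ===== VERDICT (by name: the statement is the Claim_ definition above) =====
theorem checkSemiPerfect_spec : Claim_equal_checkSemiPerfect := by
  intro n _ hpre
  unfold Spec_checkSemiPerfect
  rw [pvA_eq n hpre, pvAlt_eq n hpre,
    pvReach_perm (PySem.List.sorted_perm (pvFactorsA n) (fun x => x) false)]
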